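-- pv_equiv track=rewrite | github.com/Beliavsky/Fortran-to-C | xc_post.py | _collect_identifiers
-- ===== SOURCE A (Python) =====
-- def _collect_identifiers(code: str) -> list[str]:
--     out: list[str] = []
--     in_single = False
--     in_double = False
--     esc = False
--     i = 0
--     while i < len(code):
--         ch = code[i]
--         if esc:
--             esc = False
--             i += 1
--             continue
--         if ch == "\\" and (in_single or in_double):
--             esc = True
--             i += 1
--             continue
--         if ch == "'" and not in_double:
--             in_single = not in_single
--             i += 1
--             continue
--         if ch == '"' and not in_single:
--             in_double = not in_double
--             i += 1
--             continue
--         if in_single or in_double: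
--             i += 1
--             continue
--         if ch.isalpha() or ch == "_":
--             j = i + 1
--             while j < len(code) and (code[j].isalnum() or code[j] == "_"):
--                 j += 1
--             out.append(code[i:j])
--             i = j
--             continue
--         i += 1
--     return out
-- ===== SOURCE B (Python) =====
-- def _collect_identifiers(code: str) -> list[str]:
--     # Pass 1: mask string literals (and their quotes) to spaces, tracking one
--     # `quote` variable instead of two booleans.
--     masked = []
--     quote = None
--     esc = False
--     for ch in code:
--         if esc:
--             esc = False
--             masked.append(' ')
--         elif quote:
--             if ch == '\\':
--                 esc = True
--             elif ch == quote:
--                 quote = None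
--             masked.append(' ')
--         elif ch == "'" or ch == '"':
--             quote = ch
--             masked.append(' ')
--         else:
--             masked.append(ch)
--     # Pass 2: collect identifier runs from the masked text.
--     out = []
--     cur = ''
--     for ch in masked:
--         if cur and (ch.isalnum() or ch == '_'):
--             cur += ch
--             continue
--         if cur:
--             out.append(cur)
--             cur = ''
--         if ch.isalpha() or ch == '_':
--             cur = ch
--     if cur:
--         out.append(cur)
--     return out
-- ===== Notes on version B (the rewrite author's own statement) =====
-- stated objective: alternative
-- what changed: A is a single index-driven state machine that collects identifiers in place (with a nested inner while for each identifier); B is two independent passes: first mask every string literal (tracking one quote variable instead of two booleans and an index) to spaces, then scan the masked text once, growing and flushing a current-token buffer.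
import Mathlib
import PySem

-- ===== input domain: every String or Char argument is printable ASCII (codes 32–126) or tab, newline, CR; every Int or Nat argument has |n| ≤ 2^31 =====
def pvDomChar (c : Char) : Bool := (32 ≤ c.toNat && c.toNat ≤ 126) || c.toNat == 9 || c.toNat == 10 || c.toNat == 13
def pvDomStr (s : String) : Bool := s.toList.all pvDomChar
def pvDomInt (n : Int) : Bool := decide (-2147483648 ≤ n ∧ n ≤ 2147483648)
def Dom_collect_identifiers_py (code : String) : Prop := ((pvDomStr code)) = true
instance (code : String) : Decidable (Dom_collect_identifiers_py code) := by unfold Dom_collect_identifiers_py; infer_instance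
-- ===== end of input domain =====

-- B rewrites A's single state machine as two passes — mask string literals to spaces,
-- then collect identifier runs — with one `quote` variable instead of two booleans (objective: alternative decomposition).

-- shared character predicates (both Pythons use the same expressions)
def pvIdStart (c : Char) : Bool := PySem.Chars.isalpha c || c == '_'
def pvIdCont (c : Char) : Bool := PySem.Chars.isalnum c || c == '_'

-- ===== PORT A =====
-- literal transliteration of A's while-loop; the inner `while j < len(code)` run is the
-- takeWhile/dropWhile structural recursion over the same characters
def pvGoA : List Char → Bool → Bool → Bool → List String → List String
  | [], _, _, _, out => out
  | c :: cs, s, d, e, out =>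
    if e then pvGoA cs s d false out
    else if c = '\\' ∧ (s || d) then pvGoA cs s d true out
    else if c = '\'' ∧ ¬ d then pvGoA cs (!s) d e out
    else if c = '"' ∧ ¬ s then pvGoA cs s (!d) e out
    else if s || d then pvGoA cs s d e out
    else if pvIdStart c then
      pvGoA (cs.dropWhile pvIdCont) s d e (out ++ [String.mk (c :: cs.takeWhile pvIdCont)])
    else pvGoA cs s d e out
  termination_by cs _ _ _ _ => cs.length
  decreasing_by
  all_goals simp
  all_goals (have := List.length_dropWhile_le (p := pvIdCont) (l := cs); omega)

def collect_identifiers_py (code : String) : List String :=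
  pvGoA code.toList false false false []

-- ===== PORT B =====
-- pass 1 of Source B: mask string literals (and their quote characters) to spaces
def pvMask : List Char → Option Char → Bool → List Char
  | [], _, _ => []
  | c :: cs, q, e =>
    if e then ' ' :: pvMask cs q false
    else match q with
      | some qc =>
        if c = '\\' then ' ' :: pvMask cs q true
        else if c = qc then ' ' :: pvMask cs none false
        else ' ' :: pvMask cs q false
      | none =>
        if c = '\'' ∨ c = '"' then ' ' :: pvMask cs (some c) false
        else c :: pvMask cs none false

-- pass 2 of Source B: collect identifier runs from the masked text
def pvScan : List Char → List Char → List String → List String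
  | [], cur, out => if cur = [] then out else out ++ [String.mk cur]
  | c :: cs, cur, out =>
    if cur ≠ [] ∧ pvIdCont c then pvScan cs (cur ++ [c]) out
    else
      let out' := if cur = [] then out else out ++ [String.mk cur]
      if pvIdStart c then pvScan cs [c] out' else pvScan cs [] out'

def collect_identifiers_py_alt (code : String) : List String :=
  pvScan (pvMask code.toList none false) [] []

-- ===== PRECONDITION & SPEC =====
def Spec_collect_identifiers_py (code : String) (out : List String) : Prop := out = collect_identifiers_py_alt code
instance (code : String) (out : List String) : Decidable (Spec_collect_identifiers_py code out) := by unfold Spec_collect_identifiers_py; infer_instance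

-- ===== CLAIM (what is proved, stated in full; the proofs are below) =====
def Claim_equal_collect_identifiers_py : Prop := ∀ (code : String), Dom_collect_identifiers_py code → Spec_collect_identifiers_py code (collect_identifiers_py code)

-- ===== LEMMAS AND PROOFS =====

-- A's two booleans as B's single quote variable
def pvStateQ (s d : Bool) : Option Char := if s then some '\'' else if d then some '"' else none

theorem pvIdCont_no_quote {c : Char} (h : pvIdCont c = true) :
    c ≠ '\'' ∧ c ≠ '"' ∧ c ≠ '\\' := by
  refine ⟨?_, ?_, ?_⟩ <;> rintro rfl <;> exact absurd h (by decide)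

theorem pvIdStart_no_quote {c : Char} (h : pvIdStart c = true) :
    c ≠ '\'' ∧ c ≠ '"' := by
  constructor <;> rintro rfl <;> exact absurd h (by decide)

-- the mask keeps an identifier run intact
theorem pvMask_run (cs : List Char) :
    pvMask cs none false = cs.takeWhile pvIdCont ++ pvMask (cs.dropWhile pvIdCont) none false := by
  induction cs with
  | nil => simp [pvMask]
  | cons h t ih =>
    by_cases hp : pvIdCont h = true
    · obtain ⟨h1, h2, _⟩ := pvIdCont_no_quote hp
      simp [pvMask, hp, h1, h2, ih]
    · simp [hp]

-- scanning a run of identifier characters just extends cur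
theorem pvScan_run (run : List Char) : ∀ rest cur out, cur ≠ [] →
    (∀ x ∈ run, pvIdCont x = true) →
    pvScan (run ++ rest) cur out = pvScan rest (cur ++ run) out := by
  induction run with
  | nil => simp
  | cons h t ih =>
    intro rest cur out hcur hall
    have hh : pvIdCont h = true := hall h (by simp)
    rw [List.cons_append, pvScan]
    simp only [hcur, hh, and_self, if_pos, ne_eq, not_false_iff]
    rw [ih rest (cur ++ [h]) out (by simp) (fun x hx => hall x (by simp [hx]))]
    simp

-- when the next character cannot extend cur, cur is flushed
theorem pvScan_flush (rest cur : List Char) (out : List String) (hcur : cur ≠ [])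
    (hrest : ∀ m ∈ rest.head?, pvIdCont m = false) :
    pvScan rest cur out = pvScan rest [] (out ++ [String.mk cur]) := by
  cases rest with
  | nil => simp [pvScan, hcur]
  | cons m t =>
    have hm : pvIdCont m = false := hrest m (by simp)
    rw [pvScan, pvScan]
    simp [hcur, hm]

-- the first character of the mask of a non-run suffix cannot extend cur
theorem pvMask_head_not_cont (ds : List Char) (q : Option Char) (e : Bool)
    (hds : ∀ m ∈ ds.head?, pvIdCont m = false) :
    ∀ m ∈ (pvMask ds q e).head?, pvIdCont m = false := by
  cases ds with
  | nil => simp [pvMask]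
  | cons h t =>
    have hp : pvIdCont h = false := hds h (by simp)
    intro m hm
    simp only [pvMask] at hm
    split at hm
    · simp at hm; subst hm; decide
    · split at hm
      · split_ifs at hm <;> simp at hm <;> subst hm <;> decide
      · split_ifs at hm <;> simp at hm <;> subst hm <;> first | decide | exact hp

-- main invariant: A's machine equals mask-then-scan from the matching state
-- one-step reductions for B's two passes
theorem pvScan_step_space (rest : List Char) (out : List String) :
    pvScan (' ' :: rest) [] out = pvScan rest [] out := by
  rw [pvScan]; simp [show pvIdStart ' ' = false from by decide]

theorem pvScan_step_nonstart {c : Char} (h : pvIdStart c = false) (rest : List Char)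
    (out : List String) : pvScan (c :: rest) [] out = pvScan rest [] out := by
  rw [pvScan]; simp [h]

theorem pvScan_step_start {c : Char} (h : pvIdStart c = true) (rest : List Char)
    (out : List String) : pvScan (c :: rest) [] out = pvScan rest [c] out := by
  rw [pvScan]; simp [h]

theorem pvMain : ∀ cs (s d e : Bool) out, ¬ (s = true ∧ d = true) →
    pvGoA cs s d e out = pvScan (pvMask cs (pvStateQ s d) e) [] out := by
  intro cs s d e out
  induction cs, s, d, e, out using pvGoA.induct with
  | case1 => intro _; simp [pvGoA, pvMask, pvScan]
  | case2 c cs s d out ih =>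
    -- escape pending: both sides consume c and clear esc
    intro hsd
    rw [pvGoA, if_pos rfl, ih hsd]
    have hm : pvMask (c :: cs) (pvStateQ s d) true = ' ' :: pvMask cs (pvStateQ s d) false := by
      simp only [pvMask, if_pos]
    rw [hm, pvScan_step_space]
  | case3 c cs s d e out he hc ih =>
    -- backslash inside a string: esc is set
    intro hsd
    obtain ⟨rfl, hsd'⟩ := hc
    have he' : e = false := by revert he; cases e <;> simp
    subst he'
    rw [pvGoA, if_neg (show ¬(false = true) by simp),
       if_pos (show ('\\' = '\\' ∧ (s || d) = true) from ⟨rfl, hsd'⟩), ih hsd]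
    have hm : pvMask ('\\' :: cs) (pvStateQ s d) false = ' ' :: pvMask cs (pvStateQ s d) true := by
      cases s <;> cases d <;> simp_all [pvMask, pvStateQ]
    rw [hm, pvScan_step_space]
  | case4 c cs s d e out he hbs hc ih =>
    -- single quote, not in a double-quoted string: toggle
    intro hsd
    obtain ⟨rfl, hd⟩ := hc
    have hd' : d = false := by revert hd; cases d <;> simp
    subst hd'
    have he' : e = false := by revert he; cases e <;> simp
    subst he'
    rw [pvGoA, if_neg (show ¬(false = true) by simp), if_neg hbs,
       if_pos (show ('\'' = '\'' ∧ ¬(false : Bool) = true) from ⟨rfl, by simp⟩), ih (by simp)]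
    have hm : pvMask ('\'' :: cs) (pvStateQ s false) false = ' ' :: pvMask cs (pvStateQ (!s) false) false := by
      cases s <;> simp [pvMask, pvStateQ]
    rw [hm, pvScan_step_space]
  | case5 c cs s d e out he hbs hsq hc ih =>
    -- double quote, not in a single-quoted string: toggle
    intro hsd
    obtain ⟨rfl, hs⟩ := hc
    have hs' : s = false := by revert hs; cases s <;> simp
    subst hs'
    have he' : e = false := by revert he; cases e <;> simp
    subst he'
    rw [pvGoA, if_neg (show ¬(false = true) by simp), if_neg hbs, if_neg hsq,
       if_pos (show ('"' = '"' ∧ ¬(false : Bool) = true) from ⟨rfl, by simp⟩), ih (by simp)]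
    have hm : pvMask ('"' :: cs) (pvStateQ false d) false = ' ' :: pvMask cs (pvStateQ false (!d)) false := by
      cases d <;> simp [pvMask, pvStateQ]
    rw [hm, pvScan_step_space]
  | case6 c cs s d e out he hbs hsq hdq hin ih =>
    -- ordinary character inside a string: skipped / masked
    intro hsd
    have he' : e = false := by revert he; cases e <;> simp
    subst he'
    rw [pvGoA, if_neg (show ¬(false = true) by simp), if_neg hbs, if_neg hsq, if_neg hdq,
       if_pos hin, ih hsd]
    have hm : pvMask (c :: cs) (pvStateQ s d) false = ' ' :: pvMask cs (pvStateQ s d) false := by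
      cases s <;> cases d <;> simp_all [pvMask, pvStateQ]
    rw [hm, pvScan_step_space]
  | case7 c cs s d e out he hbs hsq hdq hout hstart ih =>
    -- identifier: A consumes the whole run, B scans it char by char off the mask
    intro hsd
    have hs' : s = false := by revert hout; cases s <;> simp
    have hd' : d = false := by revert hout; cases d <;> cases s <;> simp
    subst hs'; subst hd'
    have he' : e = false := by revert he; cases e <;> simp
    subst he'
    rw [pvGoA, if_neg (show ¬(false = true) by simp), if_neg hbs, if_neg hsq, if_neg hdq,
       if_neg (show ¬((false || false) = true) by simp), if_pos hstart, ih (by simp)]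
    obtain ⟨hq1, hq2⟩ := pvIdStart_no_quote hstart
    have hmc : pvMask (c :: cs) (pvStateQ false false) false = c :: pvMask cs none false := by
      simp [pvMask, pvStateQ, hq1, hq2]
    have hhead : ∀ m ∈ (cs.dropWhile pvIdCont).head?, pvIdCont m = false := by
      intro m hm
      cases hds : cs.dropWhile pvIdCont with
      | nil => simp [hds] at hm
      | cons m0 t0 =>
        simp [hds] at hm
        subst hm
        have := List.head_dropWhile_not pvIdCont (l := cs) (by simp [hds])
        simpa [hds] using this
    have hflush : pvScan (pvMask (cs.dropWhile pvIdCont) none false) ([c] ++ cs.takeWhile pvIdCont) out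
        = pvScan (pvMask (cs.dropWhile pvIdCont) none false) []
            (out ++ [String.mk ([c] ++ cs.takeWhile pvIdCont)]) :=
      pvScan_flush _ _ _ (by simp) (pvMask_head_not_cont _ _ _ hhead)
    conv_rhs => rw [hmc, pvMask_run, pvScan_step_start hstart,
      pvScan_run (cs.takeWhile pvIdCont) (pvMask (cs.dropWhile pvIdCont) none false) [c] out
        (by simp) (fun x hx => List.mem_takeWhile_imp hx)]
    rw [hflush]
    simp [pvStateQ]
  | case8 c cs s d e out he hbs hsq hdq hout hnstart ih =>
    -- non-identifier character outside strings: both sides skip it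
    intro hsd
    have hs' : s = false := by revert hout; cases s <;> simp
    have hd' : d = false := by revert hout; cases d <;> cases s <;> simp
    subst hs'; subst hd'
    have he' : e = false := by revert he; cases e <;> simp
    subst he'
    rw [pvGoA, if_neg (show ¬(false = true) by simp), if_neg hbs, if_neg hsq, if_neg hdq,
       if_neg (show ¬((false || false) = true) by simp), if_neg hnstart, ih (by simp)]
    have hc1 : c ≠ '\'' := by intro h; exact hsq ⟨h, by simp⟩
    have hc2 : c ≠ '"' := by intro h; exact hdq ⟨h, by simp⟩
    have hm : pvMask (c :: cs) (pvStateQ false false) false = c :: pvMask cs (pvStateQ false false) false := by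
      simp [pvMask, pvStateQ, hc1, hc2]
    rw [hm, pvScan_step_nonstart (by simpa using hnstart)]

-- ===== VERDICT (by name: the statement is the Claim_ definition above) =====
theorem collect_identifiers_py_spec : Claim_equal_collect_identifiers_py := by
  intro code _
  unfold Spec_collect_identifiers_py collect_identifiers_py collect_identifiers_py_alt
  rw [pvMain code.toList false false false [] (by simp)]
  rfl
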